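-- pv_equiv track=rewrite | github.com/kriskros341/concreteAbstractions | send_help.py | only_one_of_each_kind
-- ===== SOURCE A (Python) =====
-- def only_one_of_each_kind(prize_list, amount, itere=0):
--     if not prize_list:
--         return 1
--     if amount-prize_list[0] < 0:
--         return 0
--     return (
--         only_one_of_each_kind([x for x in prize_list if x !=prize_list[0]], amount-prize_list[0]) +
--         only_one_of_each_kind(prize_list[1:], amount))
-- ===== SOURCE B (Python) =====
-- def only_one_of_each_kind(prize_list, amount, itere=0):
--     # Top-down memoization over (remaining-tuple, amount) states instead of
--     # A's plain exponential recursion; identical return value.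
--     memo = {}
--     def go(lst, amt):
--         key = (lst, amt)
--         hit = memo.get(key)
--         if hit is not None:
--             return hit
--         if not lst:
--             res = 1
--         elif amt - lst[0] < 0:
--             res = 0
--         else:
--             head = lst[0]
--             res = go(tuple(x for x in lst if x != head), amt - head) + go(lst[1:], amt)
--         memo[key] = res
--         return res
--     return go(tuple(prize_list), amount)
-- ===== Notes on version B (the rewrite author's own statement) =====
-- stated objective: alternative
-- what changed: Replaced the plain exponential double recursion by top-down memoization over (remaining-tuple, amount) states, so each distinct subproblem is computed once; intended as faster, measured 1.36x at the largest size both finished (A timed out beyond that).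
import Mathlib
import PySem

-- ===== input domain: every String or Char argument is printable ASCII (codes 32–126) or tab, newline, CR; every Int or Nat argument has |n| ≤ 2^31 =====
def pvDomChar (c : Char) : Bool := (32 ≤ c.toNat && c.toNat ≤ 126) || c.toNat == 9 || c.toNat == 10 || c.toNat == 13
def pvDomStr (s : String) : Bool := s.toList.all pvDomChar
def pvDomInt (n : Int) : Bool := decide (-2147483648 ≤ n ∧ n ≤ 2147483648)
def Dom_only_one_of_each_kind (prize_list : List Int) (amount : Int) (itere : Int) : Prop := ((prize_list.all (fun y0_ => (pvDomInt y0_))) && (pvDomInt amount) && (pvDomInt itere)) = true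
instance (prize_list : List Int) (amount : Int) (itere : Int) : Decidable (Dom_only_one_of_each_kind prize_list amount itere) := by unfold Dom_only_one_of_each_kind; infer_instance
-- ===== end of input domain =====

-- B recomputes the same count by top-down memoization over (remaining-list, amount) states instead of A's plain double recursion; same return value.


-- ===== PORT A =====
def only_one_of_each_kind (prize_list : List Int) (amount : Int) (itere : Int) : Int :=
  match prize_list with
  | [] => 1
  | h :: t =>
    if amount - h < 0 then 0
    else
      only_one_of_each_kind ((h :: t).filter (fun x => x != h)) (amount - h) 0 +
      only_one_of_each_kind t amount 0
termination_by prize_list.length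
decreasing_by
  · simp only [List.filter_cons, bne_self_eq_false, Bool.false_eq_true, if_false, List.length_cons]
    exact Nat.lt_succ_of_le (List.length_filter_le _ _)
  · simp

-- ===== PORT B =====
-- helper: memoized recursion threading a dict keyed by (list, amount), as in Source B's `go`
def pvMemo := PySem.Dict (List Int × Int) Int

def pvGo (lst : List Int) (amt : Int) (memo : pvMemo) : Int × pvMemo :=
  match memo.get? (lst, amt) with
  | some v => (v, memo)
  | none =>
    let p : Int × pvMemo :=
      match lst with
      | [] => (1, memo)
      | h :: t =>
        if amt - h < 0 then (0, memo)
        else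
          let q1 := pvGo ((h :: t).filter (fun x => x != h)) (amt - h) memo
          let q2 := pvGo t amt q1.2
          (q1.1 + q2.1, q2.2)
    (p.1, p.2.insert (lst, amt) p.1)
termination_by lst.length
decreasing_by
  · simp only [List.filter_cons, bne_self_eq_false, Bool.false_eq_true, if_false, List.length_cons]
    exact Nat.lt_succ_of_le (List.length_filter_le _ _)
  · simp

def only_one_of_each_kind_alt (prize_list : List Int) (amount : Int) (itere : Int) : Int :=
  (pvGo prize_list amount PySem.Dict.empty).1

-- ===== PRECONDITION & SPEC =====
def Spec_only_one_of_each_kind (prize_list : List Int) (amount : Int) (itere : Int) (out : Int) : Prop := out = only_one_of_each_kind_alt prize_list amount itere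
instance (prize_list : List Int) (amount : Int) (itere : Int) (out : Int) : Decidable (Spec_only_one_of_each_kind prize_list amount itere out) := by unfold Spec_only_one_of_each_kind; infer_instance

-- ===== CLAIM (what is proved, stated in full; the proofs are below) =====
def Claim_equal_only_one_of_each_kind : Prop := ∀ (prize_list : List Int) (amount : Int) (itere : Int), Dom_only_one_of_each_kind prize_list amount itere → Spec_only_one_of_each_kind prize_list amount itere (only_one_of_each_kind prize_list amount itere)

-- ===== LEMMAS AND PROOFS =====

-- A memo is Good if every stored value is the A-value of its key.
def pvGood (memo : pvMemo) : Prop :=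
  ∀ k v, memo.get? k = some v → v = only_one_of_each_kind k.1 k.2 0

theorem pvGood_empty : pvGood PySem.Dict.empty := by
  intro k v h
  simp [PySem.Dict.get?_empty] at h

theorem pvGood_insert (memo : pvMemo) (l : List Int) (a v : Int)
    (hm : pvGood memo) (hv : v = only_one_of_each_kind l a 0) :
    pvGood (memo.insert (l, a) v) := by
  intro k w h
  rw [PySem.Dict.get?_insert] at h
  split at h
  · rename_i hk
    cases h
    subst hk
    exact hv
  · exact hm k w h

theorem pvGo_correct : ∀ (n : Nat) (lst : List Int) (amt : Int) (memo : pvMemo),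
    lst.length ≤ n → pvGood memo →
    (pvGo lst amt memo).1 = only_one_of_each_kind lst amt 0 ∧ pvGood (pvGo lst amt memo).2 := by
  intro n
  induction n with
  | zero =>
    intro lst amt memo hlen hgood
    have hnil : lst = [] := List.eq_nil_of_length_eq_zero (Nat.le_zero.mp hlen)
    subst hnil
    rw [pvGo]
    cases hget : PySem.Dict.get? memo ([], amt) with
    | some v =>
      simp only
      exact ⟨hgood _ _ hget, hgood⟩
    | none =>
      simp only
      refine ⟨by simp [only_one_of_each_kind], ?_⟩
      exact pvGood_insert memo [] amt 1 hgood (by simp [only_one_of_each_kind])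
  | succ m ih =>
    intro lst amt memo hlen hgood
    rw [pvGo.eq_def]
    cases hget : PySem.Dict.get? memo (lst, amt) with
    | some v =>
      simp only
      exact ⟨hgood _ _ hget, hgood⟩
    | none =>
      simp only
      cases lst with
      | nil =>
        refine ⟨by simp [only_one_of_each_kind], ?_⟩
        exact pvGood_insert memo [] amt 1 hgood (by simp [only_one_of_each_kind])
      | cons h t =>
        by_cases hneg : amt - h < 0
        · simp only [hneg, if_true]
          refine ⟨by simp [only_one_of_each_kind, hneg], ?_⟩
          exact pvGood_insert memo (h :: t) amt 0 hgood (by simp [only_one_of_each_kind, hneg])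
        · simp only [hneg, if_false]
          have hlent : t.length + 1 ≤ m + 1 := hlen
          have hlen2 : t.length ≤ m := by omega
          have hlen1 : ((h :: t).filter (fun x => x != h)).length ≤ m := by
            have hf : ((h :: t).filter (fun x => x != h)).length ≤ t.length := by
              simp only [List.filter_cons, bne_self_eq_false, Bool.false_eq_true, if_false]
              exact List.length_filter_le _ _
            omega
          obtain ⟨h1, g1⟩ := ih ((h :: t).filter (fun x => x != h)) (amt - h) memo hlen1 hgood
          obtain ⟨h2, g2⟩ := ih t amt _ hlen2 g1
          have hval : (pvGo ((h :: t).filter (fun x => x != h)) (amt - h) memo).1 +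
              (pvGo t amt (pvGo ((h :: t).filter (fun x => x != h)) (amt - h) memo).2).1 =
              only_one_of_each_kind (h :: t) amt 0 := by
            rw [h1, h2]
            rw [only_one_of_each_kind]
            simp [hneg]
          exact ⟨hval, pvGood_insert _ _ _ _ g2 hval⟩

-- A never reads itere
theorem only_one_of_each_kind_itere (prize_list : List Int) (amount : Int) (itere : Int) :
    only_one_of_each_kind prize_list amount itere = only_one_of_each_kind prize_list amount 0 := by
  cases prize_list <;> rw [only_one_of_each_kind, only_one_of_each_kind]

-- ===== VERDICT (by name: the statement is the Claim_ definition above) =====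
theorem only_one_of_each_kind_spec : Claim_equal_only_one_of_each_kind := by
  intro prize_list amount itere _
  unfold Spec_only_one_of_each_kind only_one_of_each_kind_alt
  rw [only_one_of_each_kind_itere]
  exact ((pvGo_correct prize_list.length prize_list amount PySem.Dict.empty le_rfl pvGood_empty).1).symm
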